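-- pv_equiv track=rewrite | github.com/Abstract-X/telebox | telebox/telegram_bot/utils.py | get_chat_id_with_prefix
-- ===== SOURCE A (Python) =====
-- def get_chat_id_with_prefix(id_: int) -> int:
--     if id_ > 0:
--         id_without_prefix = id_
--         multiplier = 1
--
--         while id_without_prefix:
--             id_without_prefix //= 10
--             multiplier *= 10
--
--         return -id_ + -100 * multiplier
--     elif id_ == 0:
--         return -100_0
--
--     return id_
-- ===== SOURCE B (Python) =====
-- def get_chat_id_with_prefix(id_: int) -> int:
--     if id_ < 0:
--         return id_
--     if id_ < 10:
--         return -1000 - id_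
--     return 10 * get_chat_id_with_prefix(id_ // 10) - id_ % 10
-- ===== Notes on version B (the rewrite author's own statement) =====
-- stated objective: alternative
-- what changed: Replaces A's two-phase scheme (a while-loop that counts digits into a power-of-ten multiplier, then one arithmetic combination, plus a separate zero branch) by a single recursive construction that builds the prefixed number directly digit by digit via f(n) = 10*f(n//10) - n%10, with no multiplier variable and no zero special case.
import Mathlib
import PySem

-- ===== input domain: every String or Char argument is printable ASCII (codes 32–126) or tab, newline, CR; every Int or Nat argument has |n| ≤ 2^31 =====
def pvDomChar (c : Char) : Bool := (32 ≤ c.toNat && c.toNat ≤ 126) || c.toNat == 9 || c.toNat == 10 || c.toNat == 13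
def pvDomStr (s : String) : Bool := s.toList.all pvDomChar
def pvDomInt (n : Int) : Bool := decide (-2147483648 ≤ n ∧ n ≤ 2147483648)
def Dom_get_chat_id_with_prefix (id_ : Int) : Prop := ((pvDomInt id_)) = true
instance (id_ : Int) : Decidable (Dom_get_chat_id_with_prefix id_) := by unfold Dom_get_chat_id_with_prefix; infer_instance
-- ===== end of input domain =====

-- B replaces A's two-phase scheme (digit-counting while-loop into a multiplier, then one
-- arithmetic combination, plus a separate zero branch) by a single recursion that builds
-- the prefixed number digit by digit (objective: alternative).

-- ===== PORT A =====
-- A's while-loop 'while id_without_prefix: id_without_prefix //= 10; multiplier *= 10'.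
-- It is only entered with id_ > 0, so the loop variable is a nonnegative int throughout
-- and Python's '// 10' coincides with Nat division; we carry it as a Nat for termination.
def prefixLoop (id_without_prefix : Nat) (multiplier : Int) : Int :=
  if id_without_prefix ≠ 0 then prefixLoop (id_without_prefix / 10) (multiplier * 10)
  else multiplier

def get_chat_id_with_prefix (id_ : Int) : Int :=
  if id_ > 0 then
    -id_ + -100 * prefixLoop id_.toNat 1
  else if id_ = 0 then
    -1000
  else id_

-- ===== PORT B =====
-- The recursive call only happens with id_ ≥ 10, so id_ // 10 ≥ 1 and id_.toNat strictly
-- decreases, which measures the termination of Source B's self-recursion.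
def get_chat_id_with_prefix_alt (id_ : Int) : Int :=
  if id_ < 0 then id_
  else if id_ < 10 then -1000 - id_
  else 10 * get_chat_id_with_prefix_alt (PySem.Int.floordiv id_ 10) - PySem.Int.mod id_ 10
termination_by id_.toNat
decreasing_by
  simp only [PySem.Int.floordiv]
  rw [Int.fdiv_eq_ediv_of_nonneg _ (by norm_num)]
  omega

-- ===== PRECONDITION & SPEC =====
def Spec_get_chat_id_with_prefix (id_ : Int) (out : Int) : Prop := out = get_chat_id_with_prefix_alt id_
instance (id_ : Int) (out : Int) : Decidable (Spec_get_chat_id_with_prefix id_ out) := by unfold Spec_get_chat_id_with_prefix; infer_instance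

-- ===== CLAIM (what is proved, stated in full; the proofs are below) =====
def Claim_equal_get_chat_id_with_prefix : Prop := ∀ (id_ : Int), Dom_get_chat_id_with_prefix id_ → Spec_get_chat_id_with_prefix id_ (get_chat_id_with_prefix id_)

-- ===== LEMMAS AND PROOFS =====
theorem prefixLoop_ne (x : Nat) (m : Int) (hx : x ≠ 0) :
    prefixLoop x m = prefixLoop (x / 10) (m * 10) := by
  rw [prefixLoop, if_pos hx]

theorem prefixLoop_zero (m : Int) : prefixLoop 0 m = m := by
  rw [prefixLoop]; simp

-- A's loop with accumulator m computes m times the loop with accumulator 1.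
theorem prefixLoop_scale (x : Nat) : ∀ m : Int, prefixLoop x m = m * prefixLoop x 1 := by
  induction x using Nat.strong_induction_on with
  | _ x ih =>
    intro m
    by_cases hx : x = 0
    · subst hx; simp [prefixLoop_zero]
    · have hlt := Nat.div_lt_self (Nat.pos_of_ne_zero hx) (show 1 < 10 by norm_num)
      rw [prefixLoop_ne x m hx, prefixLoop_ne x 1 hx, ih (x / 10) hlt (m * 10),
        ih (x / 10) hlt (1 * 10)]
      ring

-- B's recursion agrees with A's multiplier characterisation on every positive input.
theorem alt_eq_loop_nat (n : Nat) : ∀ (id_ : Int), id_.toNat = n → 1 ≤ id_ →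
    get_chat_id_with_prefix_alt id_ = -100 * prefixLoop n 1 - id_ := by
  induction n using Nat.strong_induction_on with
  | _ n ih =>
    intro id_ hn h1
    rw [get_chat_id_with_prefix_alt.eq_def, if_neg (show ¬ id_ < 0 by omega)]
    by_cases h10 : id_ < 10
    · rw [if_pos h10, prefixLoop_ne n 1 (by omega),
        Nat.div_eq_of_lt (by omega), prefixLoop_zero]
      ring
    · rw [if_neg h10]
      have hfd : PySem.Int.floordiv id_ 10 = id_ / 10 := by
        simp only [PySem.Int.floordiv]
        exact Int.fdiv_eq_ediv_of_nonneg _ (by norm_num)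
      have hq : (PySem.Int.floordiv id_ 10).toNat = n / 10 := by rw [hfd]; omega
      have hq1 : 1 ≤ PySem.Int.floordiv id_ 10 := by rw [hfd]; omega
      rw [ih (n / 10) (by omega) _ hq hq1, prefixLoop_ne n 1 (by omega),
        prefixLoop_scale (n / 10) (1 * 10)]
      have hmod : PySem.Int.mod id_ 10 = id_ - 10 * PySem.Int.floordiv id_ 10 := by
        simp only [PySem.Int.mod, PySem.Int.floordiv]
        rw [Int.fmod_eq_emod_of_nonneg _ (by norm_num), Int.fdiv_eq_ediv_of_nonneg _ (by norm_num)]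
        omega
      rw [hmod]
      ring

theorem alt_eq_loop (id_ : Int) (h1 : 1 ≤ id_) :
    get_chat_id_with_prefix_alt id_ = -100 * prefixLoop id_.toNat 1 - id_ :=
  alt_eq_loop_nat id_.toNat id_ rfl h1

-- ===== VERDICT (by name: the statement is the Claim_ definition above) =====
theorem get_chat_id_with_prefix_spec : Claim_equal_get_chat_id_with_prefix := by
  intro id_ _
  unfold Spec_get_chat_id_with_prefix
  by_cases hpos : id_ > 0
  · rw [get_chat_id_with_prefix, if_pos hpos, alt_eq_loop id_ hpos]
    ring
  · by_cases hz : id_ = 0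
    · subst hz
      rw [get_chat_id_with_prefix_alt.eq_def]
      norm_num [get_chat_id_with_prefix]
    · rw [get_chat_id_with_prefix, if_neg hpos, if_neg hz,
        get_chat_id_with_prefix_alt.eq_def, if_pos (by omega)]
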